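-- pv_equiv track=rewrite | github.com/singbong/coding_study | python/programmers 파이썬 문제 푼 것/LV.01/모의고사(복).py | solution
-- ===== SOURCE A (Python) =====
-- def solution(answer):
--     a=[1, 2, 3, 4, 5]
--     b=[2, 1, 2, 3, 2, 4, 2, 5]
--     c=[3, 3, 1, 1, 2, 2, 4, 4, 5, 5]
--     student01= a*(len(answer)//len(a))+ a[:len(answer)%len(a)]
--     student02= b*(len(answer)//len(b))+ b[:len(answer)%len(b)]
--     student03= c*(len(answer)//len(c))+ c[:len(answer)%len(c)]
--     score01=0
--     score02=0
--     score03=0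
--     for i in range(len(answer)):
--         if answer[i] == student01[i]:
--             score01+=1
--         if answer[i] == student02[i]:
--             score02+=1
--         if answer[i] == student03[i]:
--             score03+=1
--     last = [score01, score02, score03]
--     max_score = max(last)
--     answer = []
--     for i in range(3):
--          if last[i] == max_score:
--             answer.append(i+1)
--     return answer
-- ===== SOURCE B (Python) =====
-- def solution(answer):
--     patterns = [[1, 2, 3, 4, 5],
--                 [2, 1, 2, 3, 2, 4, 2, 5],
--                 [3, 3, 1, 1, 2, 2, 4, 4, 5, 5]]
--     scores = [sum(answer[r::len(p)].count(p[r]) for r in range(len(p)))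
--               for p in patterns]
--     m = max(scores)
--     return [i + 1 for i, s in enumerate(scores) if s == m]
-- ===== Notes on version B (the rewrite author's own statement) =====
-- stated objective: alternative
-- what changed: B replaces A's pre-materialized repeated answer arrays and combined triple-counter index loop by a residue decomposition: for each pattern it counts, per residue class r, how often the fixed value p[r] occurs in the strided slice answer[r::len(p)] via list.count, then sums those counts; winners are selected by a comprehension over the score list.
import Mathlib
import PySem

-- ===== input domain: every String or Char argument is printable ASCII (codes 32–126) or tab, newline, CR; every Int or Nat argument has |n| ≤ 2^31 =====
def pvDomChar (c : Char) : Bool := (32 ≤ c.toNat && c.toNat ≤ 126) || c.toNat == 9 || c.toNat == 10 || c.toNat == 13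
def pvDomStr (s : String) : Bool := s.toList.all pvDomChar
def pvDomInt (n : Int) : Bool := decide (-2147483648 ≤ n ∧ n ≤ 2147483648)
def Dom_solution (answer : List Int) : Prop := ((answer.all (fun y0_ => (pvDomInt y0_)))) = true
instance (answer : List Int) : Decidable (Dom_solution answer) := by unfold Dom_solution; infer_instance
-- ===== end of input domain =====

-- B replaces A's pre-materialized repeated pattern arrays and combined triple-counter loop
-- by a residue decomposition: per residue r it counts p[r] in the strided slice answer[r::len(p)]
-- with list.count and sums the counts (objective: alternative, same O(n) cost).

-- ===== PORT A =====
-- student0k = pattern*(len(answer)//len(pattern)) + pattern[:len(answer)%len(pattern)]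
def pvStudent (p : List Int) (n : Nat) : List Int :=
  (List.replicate (n / p.length) p).flatten ++ p.take (n % p.length)

def solution (answer : List Int) : List Int :=
  let a : List Int := [1, 2, 3, 4, 5]
  let b : List Int := [2, 1, 2, 3, 2, 4, 2, 5]
  let c : List Int := [3, 3, 1, 1, 2, 2, 4, 4, 5, 5]
  let student01 := pvStudent a answer.length
  let student02 := pvStudent b answer.length
  let student03 := pvStudent c answer.length
  -- for i in range(len(answer)): three independent if-counters (indices always in range)
  let scores :=
    (PySem.List.pyRange 0 (answer.length : Int) 1).foldl
      (fun (sc : Int × Int × Int) i =>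
        ( if PySem.List.pyGetD answer i 0 == PySem.List.pyGetD student01 i 0 then sc.1 + 1 else sc.1,
          if PySem.List.pyGetD answer i 0 == PySem.List.pyGetD student02 i 0 then sc.2.1 + 1 else sc.2.1,
          if PySem.List.pyGetD answer i 0 == PySem.List.pyGetD student03 i 0 then sc.2.2 + 1 else sc.2.2))
      (0, 0, 0)
  let last := [scores.1, scores.2.1, scores.2.2]
  -- max(last): last has length 3, so max? is always some; .getD 0 is never the default
  let maxScore := (PySem.List.max? last (fun x => x)).getD 0
  (PySem.List.pyRange 0 3 1).foldl
    (fun acc i => if PySem.List.pyGetD last i 0 == maxScore then acc ++ [i + 1] else acc) []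

-- ===== PORT B =====
-- score = sum(answer[r::len(p)].count(p[r]) for r in range(len(p)))
-- answer[r::len(p)] is PySem.List.slice?; step = len(p) ≠ 0 here, so it is always some (.getD [] never hits the default)
def pvStrideScore (answer p : List Int) : Int :=
  ((List.range p.length).map (fun (r : Nat) =>
      ((((PySem.List.slice? answer (some (r : Int)) none (p.length : Int)).getD []).count
          (p.getD r 0) : Nat) : Int))).sum

def solution_alt (answer : List Int) : List Int :=
  let patterns : List (List Int) :=
    [[1, 2, 3, 4, 5], [2, 1, 2, 3, 2, 4, 2, 5], [3, 3, 1, 1, 2, 2, 4, 4, 5, 5]]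
  let scores := patterns.map (fun p => pvStrideScore answer p)
  -- max(scores): scores has length 3, so max? is always some; .getD 0 is never the default
  let m := (PySem.List.max? scores (fun x => x)).getD 0
  (PySem.List.enumerate scores).foldl
    (fun acc is => if is.2 == m then acc ++ [is.1 + 1] else acc) []

-- ===== PRECONDITION & SPEC =====
def Spec_solution (answer : List Int) (out : List Int) : Prop := out = solution_alt answer
instance (answer : List Int) (out : List Int) : Decidable (Spec_solution answer out) := by unfold Spec_solution; infer_instance

-- ===== CLAIM (what is proved, stated in full; the proofs are below) =====
def Claim_equal_solution : Prop := ∀ (answer : List Int), Dom_solution answer → Spec_solution answer (solution answer)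

-- ===== LEMMAS AND PROOFS =====

-- common normal form of both per-pattern scores
def pvCnt (answer p : List Int) : Int :=
  ((List.range answer.length).countP
    (fun k => answer.getD k 0 == p.getD (k % p.length) 0) : Int)

-- a fold with a triple of independent if-counters is the triple of the individual counting folds
theorem pv_foldl_triple_count {B : Type} (c1 c2 c3 : B → Bool) (l : List B) (x y z : Int) :
    l.foldl (fun (sc : Int × Int × Int) e =>
        ( if c1 e then sc.1 + 1 else sc.1,
          if c2 e then sc.2.1 + 1 else sc.2.1,
          if c3 e then sc.2.2 + 1 else sc.2.2)) (x, y, z)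
      = ( l.foldl (fun s e => if c1 e then s + 1 else s) x,
          l.foldl (fun s e => if c2 e then s + 1 else s) y,
          l.foldl (fun s e => if c3 e then s + 1 else s) z) := by
  induction l generalizing x y z with
  | nil => rfl
  | cons a l ih => simp only [List.foldl_cons, ih]

theorem pv_flat_getD (p : List Int) (k i : Nat) (hi : i < k * p.length) :
    (List.flatten (List.replicate k p)).getD i 0 = p.getD (i % p.length) 0 := by
  induction k generalizing i with
  | zero => omega
  | succ k ih =>
    rw [List.replicate_succ, List.flatten_cons]
    by_cases h2 : i < p.length
    · rw [List.getD_append _ _ _ _ h2, Nat.mod_eq_of_lt h2]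
    · have hm : (k + 1) * p.length = k * p.length + p.length := by ring
      rw [List.getD_append_right _ _ _ _ (by omega)]
      rw [ih (i - p.length) (by omega)]
      conv_rhs => rw [Nat.mod_eq_sub_mod (Nat.le_of_not_lt h2)]

-- the repeated-pattern array agrees with modular indexing into the pattern
theorem pvStudent_getD (p : List Int) (hp : p ≠ []) (n i : Nat) (hi : i < n) :
    (pvStudent p n).getD i 0 = p.getD (i % p.length) 0 := by
  have hL : 0 < p.length := List.length_pos_iff.mpr hp
  have hlen : (List.flatten (List.replicate (n / p.length) p)).length = n / p.length * p.length := by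
    simp [List.length_flatten, List.map_replicate, Nat.mul_comm]
  have hdm : p.length * (n / p.length) + n % p.length = n := Nat.div_add_mod n p.length
  have hmul : p.length * (n / p.length) = n / p.length * p.length := Nat.mul_comm _ _
  unfold pvStudent
  by_cases h : i < n / p.length * p.length
  · rw [List.getD_append _ _ _ _ (by omega), pv_flat_getD p _ i h]
  · have hj : i = n / p.length * p.length + (i - n / p.length * p.length) := by omega
    set j := i - n / p.length * p.length with hjdef
    have hjr : j < n % p.length := by omega
    have hmod : i % p.length = j := by
      rw [hj, Nat.add_comm, Nat.add_mul_mod_self_right,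
          Nat.mod_eq_of_lt (by have := Nat.mod_lt n hL; omega)]
    rw [List.getD_append_right _ _ _ _ (by omega), hlen, hmod]
    rw [List.getD_eq_getElem _ _ (by
      simp only [List.length_take]
      have := Nat.mod_lt n hL
      omega)]
    rw [List.getD_eq_getElem _ _ (by have := Nat.mod_lt n hL; omega)]
    exact List.getElem_take

-- A's counter for one pattern equals the normal form
theorem pv_scoreA (answer p : List Int) (hp : p ≠ []) :
    (List.range answer.length).foldl
      (fun (s : Int) (k : Nat) =>
        if PySem.List.pyGetD answer (k : Int) 0
            == PySem.List.pyGetD (pvStudent p answer.length) (k : Int) 0 then s + 1 else s) 0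
      = pvCnt answer p := by
  rw [PySem.List.foldl_count_if
      (fun (k : Nat) => PySem.List.pyGetD answer (k : Int) 0
          == PySem.List.pyGetD (pvStudent p answer.length) (k : Int) 0)]
  unfold pvCnt
  rw [zero_add]
  norm_cast
  apply List.countP_congr
  intro k hk
  rw [List.mem_range] at hk
  simp only [PySem.List.pyGetD_natCast, pvStudent_getD p hp _ k hk]

-- ceiling division characterization: k < ⌈m/L⌉ ↔ L*k < m
theorem pv_lt_ceil (m L k : Nat) (hL : 0 < L) :
    k < (m + L - 1) / L ↔ L * k < m := by
  rw [Nat.lt_iff_add_one_le, Nat.le_div_iff_mul_le hL]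
  have h : (k + 1) * L = L * k + L := by ring
  omega

-- the strided slice answer[r::L] (positive step L) as a map over indices r, r+L, r+2L, …
theorem pv_slice_stride (xs : List Int) (r L : Nat) (hL : 0 < L) :
    (PySem.List.slice? xs (some (r : Int)) none (L : Int)).getD []
      = (List.range ((xs.length - r + L - 1) / L)).map (fun k => xs.getD (r + L * k) 0) := by
  have h1 : ¬ ((L : Int) = 0) := by omega
  have h2 : ¬ ((L : Int) < 0) := by omega
  have h3 : ¬ ((r : Int) < 0) := by omega
  have h4 : (0 : Int) < (L : Int) := by omega
  simp only [PySem.List.slice?, PySem.List.sliceIndices, h1, h2, h3, h4, if_false, if_true,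
    Option.getD_some]
  by_cases hr : r < xs.length
  · have hmin : min (r : Int) (xs.length : Int) = (r : Int) := by omega
    have hlt : (r : Int) < (xs.length : Int) := by exact_mod_cast hr
    simp only [hmin, if_pos hlt]
    have hcnt : (((xs.length : Int) - (r : Int) + (L : Int) - 1) / (L : Int)).toNat
        = (xs.length - r + L - 1) / L := by
      have h5 : ((xs.length : Int) - (r : Int) + (L : Int) - 1) = ((xs.length - r + L - 1 : Nat) : Int) := by
        omega
      rw [h5, ← Int.natCast_div, Int.toNat_natCast]
    rw [hcnt]
    rw [List.filterMap_congr (g := fun (k : Nat) => some (xs.getD (r + L * k) 0)) ?_]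
    · exact congrFun List.filterMap_eq_map _
    · intro k hk
      rw [List.mem_range] at hk
      have hidx : L * k < xs.length - r := (pv_lt_ceil _ L k hL).mp hk
      have hlen : r + L * k < xs.length := by omega
      have htn : ((r : Int) + (L : Int) * (k : Int)).toNat = r + L * k := by
        omega
      simp only [htn, List.getElem?_eq_getElem hlen, List.getD_eq_getElem _ _ hlen]
  · have hmin : min (r : Int) (xs.length : Int) = (xs.length : Int) := by omega
    simp only [hmin, if_neg (lt_irrefl ((xs.length : Int)))]
    have hz : (xs.length - r + L - 1) / L = 0 := by
      apply Nat.div_eq_of_lt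
      omega
    rw [hz, List.range_zero, List.map_nil, List.filterMap_nil]

-- countP over List.range as a Finset sum of indicators
theorem pv_countP_range (m : Nat) (q : Nat → Bool) :
    (List.range m).countP q = ∑ i ∈ Finset.range m, (if q i then 1 else 0) := by
  induction m with
  | zero => rfl
  | succ m ih =>
    rw [List.range_succ, List.countP_append, Finset.sum_range_succ, ih]
    simp [List.countP_cons]

-- sum of a map over List.range as a Finset sum
theorem pv_sum_map_range {M : Type} [AddCommMonoid M] (m : Nat) (f : Nat → M) :
    ((List.range m).map f).sum = ∑ i ∈ Finset.range m, f i := by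
  induction m with
  | zero => rfl
  | succ m ih => rw [List.range_succ, List.map_append, List.sum_append, Finset.sum_range_succ, ih]; simp

-- the residue classes r, r+L, r+2L, … for r < L partition range n
theorem pv_sum_stride {M : Type} [AddCommMonoid M] (n L : Nat) (hL : 0 < L) (f : Nat → M) :
    ∑ r ∈ Finset.range L, ∑ k ∈ Finset.range ((n - r + L - 1) / L), f (r + L * k)
      = ∑ i ∈ Finset.range n, f i := by
  rw [Finset.sum_sigma']
  apply Finset.sum_nbij' (i := fun x => x.1 + L * x.2) (j := fun i => ⟨i % L, i / L⟩)
  · intro x hx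
    rw [Finset.mem_sigma] at hx
    obtain ⟨h1, h2⟩ := hx
    rw [Finset.mem_range] at h1 h2
    rw [Finset.mem_range]
    have := (pv_lt_ceil _ L x.2 hL).mp h2
    omega
  · intro i hi
    rw [Finset.mem_range] at hi
    rw [Finset.mem_sigma, Finset.mem_range, Finset.mem_range]
    dsimp only
    refine ⟨Nat.mod_lt _ hL, ?_⟩
    rw [pv_lt_ceil _ L _ hL]
    have h1 := Nat.mod_add_div i L
    have h2 := Nat.mod_lt i hL
    omega
  · intro x hx
    rw [Finset.mem_sigma] at hx
    obtain ⟨h1, _⟩ := hx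
    rw [Finset.mem_range] at h1
    have hm : (x.1 + L * x.2) % L = x.1 := by
      rw [Nat.add_mul_mod_self_left, Nat.mod_eq_of_lt h1]
    have hd : (x.1 + L * x.2) / L = x.2 := by
      rw [Nat.add_mul_div_left _ _ hL, Nat.div_eq_of_lt h1, Nat.zero_add]
    exact Sigma.ext hm (by rw [hd])
  · intro i _
    exact Nat.mod_add_div i L
  · intro x _
    rfl

-- B's per-pattern strided-count score equals the normal form
theorem pv_scoreB (answer p : List Int) (hp : p ≠ []) :
    pvStrideScore answer p = pvCnt answer p := by
  have hL : 0 < p.length := List.length_pos_iff.mpr hp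
  unfold pvStrideScore pvCnt
  have hmap : ∀ (r : Nat), ((PySem.List.slice? answer (some (r : Int)) none (p.length : Int)).getD []).count (p.getD r 0)
      = (List.range ((answer.length - r + p.length - 1) / p.length)).countP
          (fun k => answer.getD (r + p.length * k) 0 == p.getD r 0) := by
    intro r
    rw [pv_slice_stride answer r p.length hL, List.count_eq_countP, List.countP_map]
    rfl
  simp only [hmap]
  rw [pv_sum_map_range]
  simp only [pv_countP_range]
  push_cast
  rw [← pv_sum_stride answer.length p.length hL
        (fun i => if answer.getD i 0 == p.getD (i % p.length) 0 then (1 : Int) else 0)]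
  apply Finset.sum_congr rfl
  intro r hr
  rw [Finset.mem_range] at hr
  apply Finset.sum_congr rfl
  intro k _
  have : (r + p.length * k) % p.length = r := by
    rw [Nat.add_mul_mod_self_left, Nat.mod_eq_of_lt hr]
  rw [this]

-- ===== VERDICT (by name: the statement is the Claim_ definition above) =====
theorem solution_spec : Claim_equal_solution := by
  unfold Claim_equal_solution
  intro answer _
  unfold Spec_solution solution solution_alt
  simp only []
  rw [PySem.List.pyRange_zero_natCast, List.foldl_map]
  rw [pv_foldl_triple_count
      (fun (k : Nat) => PySem.List.pyGetD answer (k : Int) 0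
          == PySem.List.pyGetD (pvStudent [1,2,3,4,5] answer.length) (k : Int) 0)
      (fun (k : Nat) => PySem.List.pyGetD answer (k : Int) 0
          == PySem.List.pyGetD (pvStudent [2,1,2,3,2,4,2,5] answer.length) (k : Int) 0)
      (fun (k : Nat) => PySem.List.pyGetD answer (k : Int) 0
          == PySem.List.pyGetD (pvStudent [3,3,1,1,2,2,4,4,5,5] answer.length) (k : Int) 0)]
  rw [pv_scoreA answer [1,2,3,4,5] (by decide),
      pv_scoreA answer [2,1,2,3,2,4,2,5] (by decide),
      pv_scoreA answer [3,3,1,1,2,2,4,4,5,5] (by decide)]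
  simp only [List.map_cons, List.map_nil,
      pv_scoreB answer [1,2,3,4,5] (by decide),
      pv_scoreB answer [2,1,2,3,2,4,2,5] (by decide),
      pv_scoreB answer [3,3,1,1,2,2,4,4,5,5] (by decide)]
  rw [show PySem.List.pyRange 0 3 1 = [0, 1, 2] from by decide]
  simp [PySem.List.enumerate, PySem.List.pyGetD, List.foldl]
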